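-- pv_equiv track=rewrite | github.com/CMU15-112/lecture_demos_qatar | week9/onlyVowels.py | onlyVowels
-- ===== SOURCE A (Python) =====
-- def onlyVowels(s):
--     if s == "":
--         return ""
--     else:
--         if s[0].lower() in "aeiou":
--             result = s[0] + onlyVowels(s[1:])
--             return result
--         else:
--             result = onlyVowels(s[1:])
--             return result
-- ===== SOURCE B (Python) =====
-- def onlyVowels(s):
--     result = ""
--     for c in s:
--         if c.lower() in "aeiou":
--             result = result + c
--     return result
-- ===== Notes on version B (the rewrite author's own statement) =====
-- stated objective: faster
-- what changed: Replaces A's head/tail recursion with slicing (s[1:]) by a single iterative pass over the characters with a string accumulator.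
import Mathlib
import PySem

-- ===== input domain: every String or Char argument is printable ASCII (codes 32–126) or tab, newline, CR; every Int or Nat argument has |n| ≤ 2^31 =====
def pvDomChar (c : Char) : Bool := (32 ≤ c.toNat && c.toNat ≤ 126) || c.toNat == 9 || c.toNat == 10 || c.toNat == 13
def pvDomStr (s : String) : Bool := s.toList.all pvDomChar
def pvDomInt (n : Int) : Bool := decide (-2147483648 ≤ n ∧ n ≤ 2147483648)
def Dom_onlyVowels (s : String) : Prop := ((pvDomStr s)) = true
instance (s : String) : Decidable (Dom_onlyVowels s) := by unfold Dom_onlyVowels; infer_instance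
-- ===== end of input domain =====

-- B replaces A's head/tail recursion over s[1:] by one iterative pass with a string accumulator (objective: simpler).
-- ===== PORT A =====
-- s[0].lower() in "aeiou"
def pvVowelTest (c : Char) : Bool :=
  PySem.Chars.isIn [PySem.Chars.lowerChar c] ['a','e','i','o','u']

def onlyVowelsCh : List Char → List Char
  | [] => []
  | c :: rest =>
    if pvVowelTest c then
      c :: onlyVowelsCh rest      -- result = s[0] + onlyVowels(s[1:])
    else
      onlyVowelsCh rest           -- result = onlyVowels(s[1:])

def onlyVowels (s : String) : String := String.mk (onlyVowelsCh s.toList)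

-- ===== PORT B =====
-- result = ""; for c in s: if c.lower() in "aeiou": result = result + c
def onlyVowels_alt (s : String) : String :=
  String.mk (s.toList.foldl (fun acc c => if pvVowelTest c then acc ++ [c] else acc) [])

-- ===== PRECONDITION & SPEC =====
def Spec_onlyVowels (s : String) (out : String) : Prop := out = onlyVowels_alt s
instance (s : String) (out : String) : Decidable (Spec_onlyVowels s out) := by unfold Spec_onlyVowels; infer_instance

-- ===== CLAIM (what is proved, stated in full; the proofs are below) =====
def Claim_equal_onlyVowels : Prop := ∀ (s : String), Dom_onlyVowels s → Spec_onlyVowels s (onlyVowels s)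

-- ===== LEMMAS AND PROOFS =====

-- ===== VERDICT (by name: the statement is the Claim_ definition above) =====
lemma foldl_eq_append_onlyVowelsCh (l acc : List Char) :
    l.foldl (fun acc c => if pvVowelTest c then acc ++ [c] else acc) acc
      = acc ++ onlyVowelsCh l := by
  induction l generalizing acc with
  | nil => simp [onlyVowelsCh]
  | cons c rest ih =>
    simp only [List.foldl_cons, onlyVowelsCh]
    by_cases h : pvVowelTest c <;> simp [h, ih]

theorem onlyVowels_spec : Claim_equal_onlyVowels := by
  intro s _
  unfold Spec_onlyVowels onlyVowels onlyVowels_alt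
  rw [foldl_eq_append_onlyVowelsCh]
  simp
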